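-- pv_equiv track=rewrite | github.com/NJPY4020/ajouMogakso | boj/잃어버린_괄호.py | minusnanugi
-- ===== SOURCE A (Python) =====
-- def minusnanugi(pulma):
--     parts = pulma.split('-')
--
--     ahp = sum(map(int, parts[0].split('+')))
--
--     total = ahp
--     for part in parts[1:]:
--         psum = sum(map(int, part.split('+')))
--         total -= psum
--
--     return total
-- ===== SOURCE B (Python) =====
-- def minusnanugi(pulma):
--     total = 0
--     neg = False
--     buf = []
--     for ch in pulma:
--         if ch == '+' or ch == '-':
--             v = int(''.join(buf))
--             total += -v if neg else v
--             if ch == '-':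
--                 neg = True
--             buf = []
--         else:
--             buf.append(ch)
--     v = int(''.join(buf))
--     total += -v if neg else v
--     return total
-- ===== Notes on version B (the rewrite author's own statement) =====
-- stated objective: alternative
-- what changed: Replaces A's two-level group-and-sum (split on '-', then sum each group's '+'-split) by a single left-to-right character pass that accumulates one token buffer and a permanent sign flag that flips on the first '-'.
import Mathlib
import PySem

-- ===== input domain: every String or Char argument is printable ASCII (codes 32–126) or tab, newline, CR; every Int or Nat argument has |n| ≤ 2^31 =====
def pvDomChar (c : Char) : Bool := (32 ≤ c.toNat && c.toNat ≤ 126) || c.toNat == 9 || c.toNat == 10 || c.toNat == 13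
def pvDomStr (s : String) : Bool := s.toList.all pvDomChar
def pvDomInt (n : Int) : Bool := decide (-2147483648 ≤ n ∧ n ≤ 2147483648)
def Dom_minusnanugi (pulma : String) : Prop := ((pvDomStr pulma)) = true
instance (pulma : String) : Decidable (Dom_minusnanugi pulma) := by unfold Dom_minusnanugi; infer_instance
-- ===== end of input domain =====

-- B replaces A's group-and-sum over split('-')/split('+') with one character pass keeping a sign flag (alternative decomposition, same cost).

-- int(token) with ValueError mapped to 0; Pre_ guarantees every token parses, so the default is never used on admitted inputs.
def pvIntOf (cs : List Char) : Int := (PySem.Int.ofChars? cs).getD 0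

-- ===== PORT A =====
-- sum(map(int, g.split('+')))
def pvPlusSum (g : List Char) : Int :=
  ((PySem.Chars.splitOn g ['+']).map pvIntOf).sum

def minusnanugi (pulma : String) : Int :=
  let parts := PySem.Chars.splitOn pulma.toList ['-']
  let ahp := pvPlusSum (parts.headD [])
  (parts.drop 1).foldl (fun total part => total - pvPlusSum part) ahp

-- ===== PORT B =====
-- the for-loop of Source B: state (total, neg, buf)
def pvBLoop : List Char → Int → Bool → List Char → Int
  | [], total, neg, buf => total + (if neg then -(pvIntOf buf) else pvIntOf buf)
  | ch :: cs, total, neg, buf =>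
    if ch = '+' ∨ ch = '-' then
      pvBLoop cs (total + (if neg then -(pvIntOf buf) else pvIntOf buf)) (neg || ch = '-') []
    else
      pvBLoop cs total neg (buf ++ [ch])

def minusnanugi_alt (pulma : String) : Int :=
  pvBLoop pulma.toList 0 false []

-- ===== PRECONDITION & SPEC =====
-- single-character split (same value as Python's str.split on one char); used only to state Pre_
def pvSp (c : Char) : List Char → List (List Char)
  | [] => [[]]
  | d :: rest =>
    if d = c then [] :: pvSp c rest
    else
      match pvSp c rest with
      | [] => [[d]]
      | h :: t => (d :: h) :: t

-- Pre_ excludes exactly the inputs where int() raises ValueError in both programs: some maximal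
-- substring between '-'/'+' separators is not a valid int literal (both programs raise there).
def Pre_minusnanugi (pulma : String) : Prop :=
  ∀ t ∈ (pvSp '-' pulma.toList).flatMap (pvSp '+'), (PySem.Int.ofChars? t).isSome = true

instance (pulma : String) : Decidable (Pre_minusnanugi pulma) := by
  unfold Pre_minusnanugi; infer_instance

def pvWitness_minusnanugi : String := "51-21+3-4"

def Spec_minusnanugi (pulma : String) (out : Int) : Prop := out = minusnanugi_alt pulma
instance (pulma : String) (out : Int) : Decidable (Spec_minusnanugi pulma out) := by unfold Spec_minusnanugi; infer_instance

-- ===== CLAIM (what is proved, stated in full; the proofs are below) =====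
def Claim_equal_minusnanugi : Prop := ∀ (pulma : String), Dom_minusnanugi pulma → Pre_minusnanugi pulma → Spec_minusnanugi pulma (minusnanugi pulma)

-- ===== LEMMAS AND PROOFS =====

-- prepend b onto the head group of a split result
def pvConsHead (b : List Char) : List (List Char) → List (List Char)
  | [] => [b]
  | h :: t => (b ++ h) :: t

theorem pvSp_ne_nil (c : Char) (l : List Char) : pvSp c l ≠ [] := by
  cases l with
  | nil => simp [pvSp]
  | cons d rest =>
    simp only [pvSp]
    split
    · simp
    · split <;> simp

theorem pvConsHead_nil (xs : List (List Char)) (h : xs ≠ []) : pvConsHead [] xs = xs := by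
  cases xs with
  | nil => exact absurd rfl h
  | cons a t => simp [pvConsHead]

theorem pvSp_cons_sep (c : Char) (rest : List Char) :
    pvSp c (c :: rest) = [] :: pvSp c rest := by
  simp [pvSp]

theorem pvSp_cons_ne (c d : Char) (rest : List Char) (h : d ≠ c) :
    pvSp c (d :: rest) = pvConsHead [d] (pvSp c rest) := by
  simp only [pvSp, if_neg h]
  cases hr : pvSp c rest with
  | nil => simp [pvConsHead]
  | cons a t => simp [pvConsHead]

theorem pvSp_prepend (c : Char) (b r : List Char) (hb : ∀ x ∈ b, x ≠ c) :
    pvSp c (b ++ r) = pvConsHead b (pvSp c r) := by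
  induction b with
  | nil => simp [pvConsHead_nil _ (pvSp_ne_nil c r)]
  | cons d b' ih =>
    have hd : d ≠ c := hb d (by simp)
    have hb' : ∀ x ∈ b', x ≠ c := fun x hx => hb x (by simp [hx])
    rw [List.cons_append, pvSp_cons_ne c d _ hd, ih hb']
    cases hr : pvSp c r with
    | nil => exact absurd hr (pvSp_ne_nil c r)
    | cons h t => simp [pvConsHead]

theorem pvSp_op_free (c : Char) (b : List Char) (hb : ∀ x ∈ b, x ≠ c) :
    pvSp c b = [b] := by
  have := pvSp_prepend c b [] hb
  simpa [pvSp, pvConsHead] using this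

-- splitOn with a single-character separator computes pvSp
theorem pvGo_single (c : Char) :
    ∀ fuel l, l.length < fuel → ∀ cur acc,
      PySem.Chars.splitOn.go [c] fuel l cur acc
        = acc.reverse ++ pvConsHead cur.reverse (pvSp c l) := by
  intro fuel
  induction fuel with
  | zero => intro l hl; omega
  | succ n ih =>
    intro l hl cur acc
    cases l with
    | nil =>
      simp [PySem.Chars.splitOn.go, pvSp, pvConsHead]
    | cons c' rest =>
      by_cases hc : c' = c
      · subst hc
        have hpre : List.isPrefixOf [c'] (c' :: rest) = true := by
          simp [List.isPrefixOf]
        rw [PySem.Chars.splitOn.go]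
        simp only [hpre, if_true, List.length_cons, List.drop_succ_cons, List.length_nil,
          List.drop_zero]
        rw [ih rest (by simpa using Nat.lt_of_succ_lt_succ hl) [] (cur.reverse :: acc)]
        rw [pvSp_cons_sep]
        simp only [List.reverse_nil]
        rw [pvConsHead_nil _ (pvSp_ne_nil c' rest)]
        simp [pvConsHead]
      · have hpre : List.isPrefixOf [c] (c' :: rest) = false := by
          simp [List.isPrefixOf]
          exact fun h => absurd h.symm hc
        rw [PySem.Chars.splitOn.go]
        simp only [hpre, Bool.false_eq_true, if_false]
        rw [ih rest (by simpa using Nat.lt_of_succ_lt_succ hl) (c' :: cur) acc]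
        rw [pvSp_cons_ne c c' rest hc]
        cases hr : pvSp c rest with
        | nil => exact absurd hr (pvSp_ne_nil c rest)
        | cons h t => simp [pvConsHead]

theorem splitOn_single (c : Char) (l : List Char) :
    PySem.Chars.splitOn l [c] = pvSp c l := by
  unfold PySem.Chars.splitOn
  rw [pvGo_single c (l.length + 1) l (by omega) [] []]
  simp [pvConsHead_nil _ (pvSp_ne_nil c l)]

-- values of groups
def pvPsum (g : List Char) : Int := ((pvSp '+' g).map pvIntOf).sum
def pvNval (s : List Char) : Int := ((pvSp '-' s).map pvPsum).sum
def pvAval (s : List Char) : Int :=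
  match pvSp '-' s with
  | [] => 0
  | h :: t => pvPsum h - (t.map pvPsum).sum

def pvOpFree (b : List Char) : Prop := ∀ x ∈ b, x ≠ '+' ∧ x ≠ '-'

theorem pvPsum_op_free (b : List Char) (hb : pvOpFree b) : pvPsum b = pvIntOf b := by
  unfold pvPsum
  rw [pvSp_op_free '+' b (fun x hx => (hb x hx).1)]
  simp

theorem pvNval_op_free (b : List Char) (hb : pvOpFree b) : pvNval b = pvIntOf b := by
  unfold pvNval
  rw [pvSp_op_free '-' b (fun x hx => (hb x hx).2)]
  simp [pvPsum_op_free b hb]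

theorem pvAval_op_free (b : List Char) (hb : pvOpFree b) : pvAval b = pvIntOf b := by
  unfold pvAval
  rw [pvSp_op_free '-' b (fun x hx => (hb x hx).2)]
  simp [pvPsum_op_free b hb]

theorem pvPsum_plus (b h : List Char) (hb : pvOpFree b) :
    pvPsum (b ++ '+' :: h) = pvIntOf b + pvPsum h := by
  unfold pvPsum
  rw [pvSp_prepend '+' b ('+' :: h) (fun x hx => (hb x hx).1), pvSp_cons_sep]
  simp [pvConsHead]

theorem pvNval_minus (b cs : List Char) (hb : pvOpFree b) :
    pvNval (b ++ '-' :: cs) = pvIntOf b + pvNval cs := by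
  unfold pvNval
  rw [pvSp_prepend '-' b ('-' :: cs) (fun x hx => (hb x hx).2), pvSp_cons_sep]
  rw [pvConsHead]
  simp [pvPsum_op_free b hb]

theorem pvNval_plus (b cs : List Char) (hb : pvOpFree b) :
    pvNval (b ++ '+' :: cs) = pvIntOf b + pvNval cs := by
  unfold pvNval
  have hb' : ∀ x ∈ b ++ ['+'], x ≠ '-' := by
    intro x hx
    rcases List.mem_append.mp hx with h | h
    · exact (hb x h).2
    · simp at h; subst h; decide
  have : b ++ '+' :: cs = (b ++ ['+']) ++ cs := by simp
  rw [this, pvSp_prepend '-' (b ++ ['+']) cs hb']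
  cases hr : pvSp '-' cs with
  | nil => exact absurd hr (pvSp_ne_nil _ _)
  | cons h t =>
    simp only [pvConsHead, List.map_cons, List.sum_cons]
    have : (b ++ ['+']) ++ h = b ++ '+' :: h := by simp
    rw [this, pvPsum_plus b h hb]
    ring

theorem pvAval_minus (b cs : List Char) (hb : pvOpFree b) :
    pvAval (b ++ '-' :: cs) = pvIntOf b - pvNval cs := by
  unfold pvAval pvNval
  rw [pvSp_prepend '-' b ('-' :: cs) (fun x hx => (hb x hx).2), pvSp_cons_sep]
  rw [pvConsHead]
  simp [pvPsum_op_free b hb]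

theorem pvAval_plus (b cs : List Char) (hb : pvOpFree b) :
    pvAval (b ++ '+' :: cs) = pvIntOf b + pvAval cs := by
  unfold pvAval
  have hb' : ∀ x ∈ b ++ ['+'], x ≠ '-' := by
    intro x hx
    rcases List.mem_append.mp hx with h | h
    · exact (hb x h).2
    · simp at h; subst h; decide
  have heq : b ++ '+' :: cs = (b ++ ['+']) ++ cs := by simp
  rw [heq, pvSp_prepend '-' (b ++ ['+']) cs hb']
  cases hr : pvSp '-' cs with
  | nil => exact absurd hr (pvSp_ne_nil _ _)
  | cons h t =>
    simp only [pvConsHead]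
    have : (b ++ ['+']) ++ h = b ++ '+' :: h := by simp
    rw [this, pvPsum_plus b h hb]
    ring

theorem pvOpFree_append (b : List Char) (d : Char) (hb : pvOpFree b)
    (hd : d ≠ '+' ∧ d ≠ '-') : pvOpFree (b ++ [d]) := by
  intro x hx
  rcases List.mem_append.mp hx with h | h
  · exact hb x h
  · simp at h; subst h; exact hd

-- B's loop with neg = true subtracts the sum of every remaining token
theorem pvBLoop_true (cs : List Char) : ∀ total buf, pvOpFree buf →
    pvBLoop cs total true buf = total - pvNval (buf ++ cs) := by
  induction cs with
  | nil =>
    intro total buf hb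
    simp [pvBLoop, pvNval_op_free buf hb]
    ring
  | cons ch cs' ih =>
    intro total buf hb
    by_cases hop : ch = '+' ∨ ch = '-'
    · rw [pvBLoop, if_pos hop]
      simp only [Bool.true_or]
      rw [if_pos trivial]
      rw [ih _ [] (by intro x hx; simp at hx)]
      rcases hop with h | h <;> subst h
      · rw [pvNval_plus buf cs' hb]; simp only [List.nil_append]; ring
      · rw [pvNval_minus buf cs' hb]; simp only [List.nil_append]; ring
    · rw [pvBLoop, if_neg hop]
      rw [not_or] at hop
      rw [ih total (buf ++ [ch]) (pvOpFree_append buf ch hb hop)]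
      simp

-- B's loop with neg = false computes A's grouped value of the remaining text
theorem pvBLoop_false (cs : List Char) : ∀ total buf, pvOpFree buf →
    pvBLoop cs total false buf = total + pvAval (buf ++ cs) := by
  induction cs with
  | nil =>
    intro total buf hb
    simp [pvBLoop, pvAval_op_free buf hb]
  | cons ch cs' ih =>
    intro total buf hb
    by_cases hop : ch = '+' ∨ ch = '-'
    · rw [pvBLoop, if_pos hop]
      rw [if_neg (by simp)]
      rcases hop with h | h <;> subst h
      · have : (false || decide (('+' : Char) = '-')) = false := by decide
        rw [this]
        rw [ih _ [] (by intro x hx; simp at hx)]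
        rw [pvAval_plus buf cs' hb]; simp only [List.nil_append]; ring
      · have : (false || decide (('-' : Char) = '-')) = true := by decide
        rw [this]
        rw [pvBLoop_true cs' _ [] (by intro x hx; simp at hx)]
        rw [pvAval_minus buf cs' hb]; simp only [List.nil_append]; ring
    · rw [pvBLoop, if_neg hop]
      rw [not_or] at hop
      rw [ih total (buf ++ [ch]) (pvOpFree_append buf ch hb hop)]
      simp

theorem pvAlt_eq_aval (pulma : String) : minusnanugi_alt pulma = pvAval pulma.toList := by
  unfold minusnanugi_alt
  rw [pvBLoop_false pulma.toList 0 [] (by intro x hx; simp at hx)]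
  simp

theorem pvFoldl_sub (l : List (List Char)) : ∀ a : Int,
    l.foldl (fun total part => total - pvPsum part) a = a - (l.map pvPsum).sum := by
  induction l with
  | nil => intro a; simp
  | cons h t ih => intro a; simp [List.foldl_cons, ih]; ring

theorem pvPlusSum_eq_psum (g : List Char) : pvPlusSum g = pvPsum g := by
  unfold pvPlusSum pvPsum
  rw [splitOn_single]

theorem pvA_eq_aval (pulma : String) : minusnanugi pulma = pvAval pulma.toList := by
  unfold minusnanugi
  rw [splitOn_single '-' pulma.toList]
  cases hr : pvSp '-' pulma.toList with
  | nil => exact absurd hr (pvSp_ne_nil _ _)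
  | cons h t =>
    simp only [List.headD_cons, List.drop_one, List.tail_cons, pvPlusSum_eq_psum]
    rw [pvFoldl_sub]
    unfold pvAval
    rw [hr]

-- ===== VERDICT (by name: the statement is the Claim_ definition above) =====
theorem minusnanugi_spec : Claim_equal_minusnanugi := by
  intro pulma _ _
  unfold Spec_minusnanugi
  rw [pvA_eq_aval, pvAlt_eq_aval]
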